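-- pv_equiv track=rewrite | github.com/aaryanshah7654/Python-Classes | Python Assignment/day-6.py | ceaser_chiper
-- ===== SOURCE A (Python) =====
-- def ceaser_chiper(code, step):
--     Encrypted = ""
--     for char in code:
--         if char.isdigit():
--             new_digit = (int(char) + step ) % 10
--             Encrypted += str(new_digit)
--         else:
--             Encrypted += char
--     return Encrypted
-- ===== SOURCE B (Python) =====
-- def ceaser_chiper(code, step):
--     out = list(code)
--     for d, ch_d in enumerate("0123456789"):
--         rep = str((d + step) % 10)
--         for i, ch in enumerate(code):
--             if ch == ch_d:
--                 out[i] = rep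
--     return "".join(out)
-- ===== Notes on version B (the rewrite author's own statement) =====
-- stated objective: alternative
-- what changed: B replaces A's single char-major pass (per-character isdigit test, int/str conversion, string concatenation) by a staged digit-major algorithm: it materialises the string as a mutable list and runs ten substitution passes, one per digit value, each pass overwriting every position holding that digit with its precomputed shifted digit; non-digits are never touched.
import Mathlib
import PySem

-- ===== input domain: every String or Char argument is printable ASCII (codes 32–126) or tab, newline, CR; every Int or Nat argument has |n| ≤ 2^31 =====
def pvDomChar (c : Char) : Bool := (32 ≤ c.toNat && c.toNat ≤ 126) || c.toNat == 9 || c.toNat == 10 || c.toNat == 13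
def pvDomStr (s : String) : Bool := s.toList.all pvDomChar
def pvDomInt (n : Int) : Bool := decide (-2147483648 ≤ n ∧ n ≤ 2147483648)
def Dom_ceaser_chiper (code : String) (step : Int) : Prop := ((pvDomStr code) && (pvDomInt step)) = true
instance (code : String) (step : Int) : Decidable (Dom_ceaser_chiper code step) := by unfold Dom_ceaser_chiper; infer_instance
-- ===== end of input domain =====

-- B replaces A's char-major if/else pass by a staged digit-major algorithm: ten substitution
-- passes over a mutable list, one per digit value; same return value (objective: alternative).

-- ===== PORT A =====
-- 'int(char)' is ported as c.toNat - 48, exact for the ASCII digits, the only chars the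
-- isdigit branch admits on the domain; the string accumulator is a List Char, packed at the end.
def ceaser_chiper (code : String) (step : Int) : String :=
  String.ofList (code.toList.foldl (fun acc c =>
    if PySem.Chars.isdigit c then
      acc ++ PySem.Int.toChars (PySem.Int.mod (((c.toNat : Int) - 48) + step) 10)
    else acc ++ [c]) [])

-- ===== PORT B =====
-- out = list(code) is a List (List Char) (each cell one char, later possibly a digit string);
-- the two enumerate loops are folds over PySem.List.enumerate; ''.join is flatten + pack.
def ceaser_chiper_alt (code : String) (step : Int) : String :=
  String.ofList (List.flatten (
    (PySem.List.enumerate "0123456789".toList 0).foldl (fun out p =>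
      (PySem.List.enumerate code.toList 0).foldl (fun out2 q =>
        if q.2 == p.2 then out2.set q.1.toNat (PySem.Int.toChars (PySem.Int.mod (p.1 + step) 10))
        else out2) out)
      (code.toList.map (fun c => [c]))))

-- ===== PRECONDITION & SPEC =====
def Spec_ceaser_chiper (code : String) (step : Int) (out : String) : Prop := out = ceaser_chiper_alt code step
instance (code : String) (step : Int) (out : String) : Decidable (Spec_ceaser_chiper code step out) := by unfold Spec_ceaser_chiper; infer_instance

-- ===== CLAIM =====
def Claim_equal_ceaser_chiper : Prop := ∀ (code : String) (step : Int), Dom_ceaser_chiper code step → Spec_ceaser_chiper code step (ceaser_chiper code step)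

-- ===== LEMMAS AND PROOFS =====

-- setting the cell right after a prefix
theorem pv_set_at {β : Type} (pre : List β) (a b : β) (rest : List β) :
    (pre ++ a :: rest).set pre.length b = pre ++ b :: rest := by
  induction pre with
  | nil => rfl
  | cons x xs ih => simp [ih]

-- one substitution pass, characterised: positions holding chd become rep, others keep g
theorem pv_inner_pass {β : Type} (l : List Char) (chd : Char) (rep : β) (g : Char → β)
    (pre : List β) (n : Int) (hn : n = (pre.length : Int)) :
    (PySem.List.enumerate l n).foldl
        (fun out2 q => if q.2 == chd then out2.set q.1.toNat rep else out2)
        (pre ++ l.map g)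
    = pre ++ l.map (fun c => if c == chd then rep else g c) := by
  induction l generalizing pre n with
  | nil => simp [PySem.List.enumerate_nil]
  | cons x t ih =>
    rw [PySem.List.enumerate_cons]
    simp only [List.foldl_cons, List.map_cons]
    have hnt : n.toNat = pre.length := by omega
    by_cases hx : (x == chd) = true
    · rw [if_pos hx, hnt, pv_set_at]
      have := ih (pre ++ [rep]) (n + 1) (by simp; omega)
      simpa [hx] using this
    · rw [if_neg hx]
      have := ih (pre ++ [g x]) (n + 1) (by simp; omega)
      simpa [hx] using this

theorem pv_inner_pass0 {β : Type} (l : List Char) (chd : Char) (rep : β) (g : Char → β) :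
    (PySem.List.enumerate l 0).foldl
        (fun out2 q => if q.2 == chd then out2.set q.1.toNat rep else out2)
        (l.map g)
    = l.map (fun c => if c == chd then rep else g c) := by
  simpa using pv_inner_pass l chd rep g [] 0 (by simp)

-- ===== VERDICT =====
theorem ceaser_chiper_spec : Claim_equal_ceaser_chiper := by
  intro code step _
  unfold Spec_ceaser_chiper ceaser_chiper ceaser_chiper_alt
  -- A side: the append-fold is a flatMap
  have hstep : (fun (acc : List Char) (c : Char) =>
        if PySem.Chars.isdigit c then
          acc ++ PySem.Int.toChars (PySem.Int.mod (((c.toNat : Int) - 48) + step) 10)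
        else acc ++ [c])
      = (fun acc c => acc ++ (if PySem.Chars.isdigit c then
          PySem.Int.toChars (PySem.Int.mod (((c.toNat : Int) - 48) + step) 10) else [c])) := by
    funext acc c; split <;> rfl
  rw [hstep, PySem.List.foldl_append_eq_flatMap, List.nil_append]
  -- B side: unfold the ten passes
  have he : PySem.List.enumerate "0123456789".toList 0
      = [((0:Int),'0'),(1,'1'),(2,'2'),(3,'3'),(4,'4'),(5,'5'),(6,'6'),(7,'7'),(8,'8'),(9,'9')] := by
    decide
  rw [he]
  simp only [List.foldl_cons, List.foldl_nil, pv_inner_pass0]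
  -- the composed per-character function equals A's
  rw [← List.flatMap_def]
  refine congrArg String.ofList (congrFun (congrArg List.flatMap (funext fun c => ?_)) code.toList)
  by_cases hd : PySem.Chars.isdigit c = true
  · have : c = '0' ∨ c = '1' ∨ c = '2' ∨ c = '3' ∨ c = '4' ∨ c = '5' ∨ c = '6' ∨ c = '7' ∨ c = '8' ∨ c = '9' := by
      simp only [PySem.Chars.isdigit, Bool.and_eq_true, decide_eq_true_eq, Char.le_def] at hd
      have h1 : 48 ≤ c.val.toNat := UInt32.le_iff_toNat_le.mp hd.1
      have h2 : c.val.toNat ≤ 57 := UInt32.le_iff_toNat_le.mp hd.2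
      have hofNat : Char.ofNat c.toNat = c := Char.ofNat_toNat c
      have htoNat : c.toNat = c.val.toNat := rfl
      interval_cases hn : c.val.toNat <;> rw [← hofNat, htoNat] <;> decide
    rcases this with h0|h0|h0|h0|h0|h0|h0|h0|h0|h0 <;> subst h0 <;> simp [hd]
  · have hne : ∀ dch : Char, PySem.Chars.isdigit dch = true → (c == dch) = false := by
      intro dch hdch
      by_contra hb
      simp only [Bool.not_eq_false, beq_iff_eq] at hb
      subst hb
      exact hd hdch
    rw [if_neg (by simp [hd])]
    simp [hne '0' (by decide), hne '1' (by decide), hne '2' (by decide), hne '3' (by decide),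
      hne '4' (by decide), hne '5' (by decide), hne '6' (by decide), hne '7' (by decide),
      hne '8' (by decide), hne '9' (by decide)]
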